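-- pv_equiv track=rewrite | github.com/NeckofNickey/algorithms | sets/check_symmetrical_str.py | check_symmetrical_str
-- ===== SOURCE A (Python) =====
-- def check_symmetrical_str(s):
--
--     if not s:
--         return 'NO'
--
--     set_str_len = len(set(s))
--
--     left_set = set()
--
--     index = None
--
--     for i in range(0, len(s)):
--         left_set.add(s[i])
--         if len(left_set) == set_str_len:
--             index = i
--             break
--
--     right_set = set(s[index + 1:])
--
--     if len(right_set) == set_str_len:
--         return 'YES'
--     else:
--         return 'NO'
-- ===== SOURCE B (Python) =====
-- def check_symmetrical_str(s):
--     if not s: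
--         return 'NO'
--     first = {}
--     last = {}
--     for i, c in enumerate(s):
--         if c not in first:
--             first[c] = i
--         last[c] = i
--     fmax = max(first.values())
--     lmin = min(last.values())
--     return 'YES' if lmin > fmax else 'NO'
-- ===== Notes on version B (the rewrite author's own statement) =====
-- stated objective: simpler
-- what changed: Replaces the greedy prefix-set growth with break plus rebuilding a set of the suffix by a single enumerate pass recording each character's first and last index, returning YES iff min(last indices) > max(first indices).
import Mathlib
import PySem

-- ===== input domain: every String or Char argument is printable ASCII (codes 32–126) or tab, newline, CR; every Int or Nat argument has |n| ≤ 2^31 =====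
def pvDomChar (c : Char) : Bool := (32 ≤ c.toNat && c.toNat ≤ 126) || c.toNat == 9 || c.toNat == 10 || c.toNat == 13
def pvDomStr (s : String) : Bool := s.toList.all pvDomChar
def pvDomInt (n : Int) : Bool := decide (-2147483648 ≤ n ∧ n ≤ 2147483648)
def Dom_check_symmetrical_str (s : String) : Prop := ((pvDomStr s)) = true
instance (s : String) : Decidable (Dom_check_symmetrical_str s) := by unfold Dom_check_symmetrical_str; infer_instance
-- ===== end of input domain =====

-- B replaces A's greedy prefix-set growth plus suffix set rebuild by one pass recording each
-- character's first and last index, answering YES iff min(last occurrences) > max(first occurrences).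


-- ===== PORT A =====
-- the Python loop 'for i in range(0, len(s)): left_set.add(s[i]); if len(left_set) == set_str_len:
-- index = i; break' as structural recursion over the remaining characters with running index i;
-- 'none' is the case where the loop never breaks (unreachable for nonempty s, where Python would
-- hit 'index = None' and raise on s[index + 1:])
def pvALoop (total : Int) : List Char → PySem.Set Char → Nat → Option Nat
  | [], _, _ => none
  | c :: rest, acc, i =>
      let acc' := PySem.Set.add acc c
      if PySem.Set.len acc' = total then some i else pvALoop total rest acc' (i + 1)

def check_symmetrical_str (s : String) : String :=
  let l := s.toList
  if l = [] then "NO"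
  else
    let total := PySem.Set.len (PySem.Set.ofList l)
    match pvALoop total l PySem.Set.empty 0 with
    | none => "NO"  -- unreachable: for nonempty s the loop always breaks
    | some i =>
      let right : PySem.Set Char := PySem.Set.ofList (PySem.List.slice l (some ((i : Int) + 1)) none)
      if PySem.Set.len right = total then "YES" else "NO"

-- ===== PORT B =====
def check_symmetrical_str_alt (s : String) : String :=
  let l := s.toList
  if l = [] then "NO"
  else
    let fl := (PySem.List.enumerate l 0).foldl
      (fun (fl : PySem.Dict Char Int × PySem.Dict Char Int) p =>
        ((if fl.1.contains p.2 then fl.1 else fl.1.insert p.2 p.1), fl.2.insert p.2 p.1))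
      (PySem.Dict.empty, PySem.Dict.empty)
    match PySem.List.max? fl.1.values (fun v => v), PySem.List.min? fl.2.values (fun v => v) with
    | some fmax, some lmin => if lmin > fmax then "YES" else "NO"
    | _, _ => "NO"  -- unreachable: both dicts are nonempty for nonempty s

-- ===== PRECONDITION & SPEC =====
def Spec_check_symmetrical_str (s : String) (out : String) : Prop := out = check_symmetrical_str_alt s
instance (s : String) (out : String) : Decidable (Spec_check_symmetrical_str s out) := by unfold Spec_check_symmetrical_str; infer_instance

-- ===== CLAIM (what is proved, stated in full; the proofs are below) =====
def Claim_equal_check_symmetrical_str : Prop := ∀ (s : String), Dom_check_symmetrical_str s → Spec_check_symmetrical_str s (check_symmetrical_str s)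

-- ===== LEMMAS AND PROOFS =====

def pvCovers (l sub : List Char) : Prop := ∀ c ∈ l, c ∈ sub

def pvFirst? (c : Char) : List Char → Option Nat
  | [] => none
  | x :: r => if x = c then some 0 else (pvFirst? c r).map (· + 1)

def pvLast? (c : Char) : List Char → Option Nat
  | [] => none
  | x :: r =>
      match pvLast? c r with
      | some k => some (k + 1)
      | none => if x = c then some 0 else none

theorem pvFirst?_eq_none (c : Char) (l : List Char) : pvFirst? c l = none ↔ c ∉ l := by
  induction l with
  | nil => simp [pvFirst?]
  | cons x r ih =>
    simp only [pvFirst?, List.mem_cons]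
    split_ifs with h
    · simp [h]
    · simp only [Option.map_eq_none_iff, ih]
      constructor
      · intro hr hor; rcases hor with h1 | h2
        · exact h h1.symm
        · exact hr h2
      · intro hn; exact fun h2 => hn (Or.inr h2)

theorem pvLast?_eq_none (c : Char) (l : List Char) : pvLast? c l = none ↔ c ∉ l := by
  induction l with
  | nil => simp [pvLast?]
  | cons x r ih =>
    simp only [pvLast?, List.mem_cons]
    cases h : pvLast? c r with
    | some k =>
      rw [h] at ih
      simp only [reduceCtorEq, false_iff] at ih ⊢
      push Not at ih ⊢
      exact Or.inr ih
    | none =>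
      rw [h] at ih
      split_ifs with hx
      · simp [hx]
      · constructor
        · intro _ hm
          rcases hm with h1 | h2
          · exact hx h1.symm
          · exact ih.mp rfl h2
        · intro _; rfl

theorem pvFirst?_spec (c : Char) (l : List Char) (k : Nat) (h : pvFirst? c l = some k) :
    k < l.length ∧ l[k]? = some c ∧ ∀ j < k, l[j]? ≠ some c := by
  induction l generalizing k with
  | nil => simp [pvFirst?] at h
  | cons x r ih =>
    simp only [pvFirst?] at h
    split_ifs at h with hx
    · cases h
      subst hx
      refine ⟨by simp, by simp, by omega⟩
    · cases hk : pvFirst? c r with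
      | none => simp [hk] at h
      | some k' =>
        simp only [hk, Option.map_some] at h
        cases h
        obtain ⟨h1, h2, h3⟩ := ih k' hk
        refine ⟨by simpa using h1, by simpa using h2, ?_⟩
        intro j hj
        cases j with
        | zero => simpa using fun hc => hx hc
        | succ j' => simpa using h3 j' (by omega)

theorem pvLast?_spec (c : Char) (l : List Char) (k : Nat) (h : pvLast? c l = some k) :
    k < l.length ∧ l[k]? = some c ∧ ∀ j, k < j → l[j]? ≠ some c := by
  induction l generalizing k with
  | nil => simp [pvLast?] at h
  | cons x r ih =>
    simp only [pvLast?] at h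
    cases hk : pvLast? c r with
    | some k' =>
      rw [hk] at h
      cases h
      obtain ⟨h1, h2, h3⟩ := ih k' hk
      refine ⟨by simpa using h1, by simpa using h2, ?_⟩
      intro j hj
      cases j with
      | zero => omega
      | succ j' => simpa using h3 j' (by omega)
    | none =>
      rw [hk] at h
      split_ifs at h with hx
      · cases h
        subst hx
        refine ⟨by simp, by simp, ?_⟩
        intro j hj
        cases j with
        | zero => omega
        | succ j' =>
          simp only [List.getElem?_cons_succ]
          intro hcon
          exact (pvLast?_eq_none _ r).mp hk (List.mem_of_getElem? hcon)

theorem mem_take_iff_pvFirst (c : Char) (l : List Char) (m : Nat) :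
    c ∈ l.take m ↔ ∃ k, pvFirst? c l = some k ∧ k < m := by
  constructor
  · intro h
    have hml : c ∈ l := List.mem_of_mem_take h
    cases hk : pvFirst? c l with
    | none => exact absurd hml ((pvFirst?_eq_none c l).mp hk)
    | some k =>
      refine ⟨k, rfl, ?_⟩
      obtain ⟨j, hjt⟩ := List.getElem?_of_mem h
      have hjm := hjt
      rw [List.getElem?_take] at hjm
      obtain ⟨_, h2, h3⟩ := pvFirst?_spec c l k hk
      by_contra hnk
      split_ifs at hjm with hjlt
      exact h3 j (by omega) hjm
  · rintro ⟨k, hk, hkm⟩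
    obtain ⟨h1, h2, _⟩ := pvFirst?_spec c l k hk
    have : (l.take m)[k]? = some c := by
      rw [List.getElem?_take]
      simp [hkm, h2]
    exact List.mem_of_getElem? this

theorem mem_drop_iff_pvLast (c : Char) (l : List Char) (m : Nat) :
    c ∈ l.drop m ↔ ∃ k, pvLast? c l = some k ∧ m ≤ k := by
  constructor
  · intro h
    have hml : c ∈ l := List.mem_of_mem_drop h
    cases hk : pvLast? c l with
    | none => exact absurd hml ((pvLast?_eq_none c l).mp hk)
    | some k =>
      refine ⟨k, rfl, ?_⟩
      obtain ⟨j, hjt⟩ := List.getElem?_of_mem h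
      have hj : l[m + j]? = some c := by
        rw [← List.getElem?_drop]; exact hjt
      obtain ⟨_, _, h3⟩ := pvLast?_spec c l k hk
      by_contra hnk
      exact h3 (m + j) (by omega) hj
  · rintro ⟨k, hk, hkm⟩
    obtain ⟨h1, h2, _⟩ := pvLast?_spec c l k hk
    have : (l.drop m)[k - m]? = some c := by
      rw [List.getElem?_drop]
      rwa [Nat.add_sub_cancel' hkm]
    exact List.mem_of_getElem? this

theorem pvFirst?_append_singleton (c x : Char) (xs : List Char) :
    pvFirst? c (xs ++ [x]) =
      match pvFirst? c xs with
      | some k => some k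
      | none => if x = c then some xs.length else none := by
  induction xs with
  | nil => simp [pvFirst?]
  | cons y ys ih =>
    by_cases hy : y = c
    · simp [pvFirst?, hy]
    · simp only [List.cons_append, pvFirst?, if_neg hy, ih]
      cases h : pvFirst? c ys with
      | some k => simp
      | none => by_cases hx : x = c <;> simp [hx]

theorem pvLast?_append_singleton (c x : Char) (xs : List Char) :
    pvLast? c (xs ++ [x]) = if x = c then some xs.length else pvLast? c xs := by
  induction xs with
  | nil => simp [pvLast?]
  | cons y ys ih =>
    simp only [List.cons_append, pvLast?, ih]
    by_cases hx : x = c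
    · simp [hx]
    · simp [hx]

theorem pvCover_len (l sub : List Char) (hsub : sub ⊆ l) :
    PySem.Set.len (PySem.Set.ofList sub) = PySem.Set.len (PySem.Set.ofList l) ↔ pvCovers l sub := by
  rw [PySem.Set.len_eq, PySem.Set.len_eq]
  have hns : (PySem.Set.ofList sub).Nodup := PySem.Set.nodup_ofList sub
  have hss : (PySem.Set.ofList sub : List Char) ⊆ PySem.Set.ofList l := by
    intro y hy
    exact (PySem.Set.mem_ofList l y).mpr (hsub ((PySem.Set.mem_ofList sub y).mp hy))
  have hsp : List.Subperm (PySem.Set.ofList sub) (PySem.Set.ofList l) :=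
    List.subperm_of_subset hns hss
  constructor
  · intro hlen c hc
    have hlen' : (PySem.Set.ofList l : List Char).length ≤ (PySem.Set.ofList sub : List Char).length := by
      omega
    have hperm := hsp.perm_of_length_le hlen'
    exact (PySem.Set.mem_ofList sub c).mp (hperm.symm.mem_iff.mp ((PySem.Set.mem_ofList l c).mpr hc))
  · intro hcov
    have hls : (PySem.Set.ofList l : List Char) ⊆ PySem.Set.ofList sub := by
      intro y hy
      exact (PySem.Set.mem_ofList sub y).mpr (hcov y ((PySem.Set.mem_ofList l y).mp hy))
    have hsp' : List.Subperm (PySem.Set.ofList l) (PySem.Set.ofList sub) :=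
      List.subperm_of_subset (PySem.Set.nodup_ofList l) hls
    have := hsp.length_le
    have := hsp'.length_le
    omega

def pvFirstD (l : List Char) : PySem.Dict Char Int :=
  (PySem.List.enumerate l 0).foldl
    (fun d p => if d.contains p.2 then d else d.insert p.2 p.1) PySem.Dict.empty

def pvLastD (l : List Char) : PySem.Dict Char Int :=
  (PySem.List.enumerate l 0).foldl (fun d p => d.insert p.2 p.1) PySem.Dict.empty

theorem pvEnum_append (xs : List Char) (x : Char) :
    PySem.List.enumerate (xs ++ [x]) 0
      = PySem.List.enumerate xs 0 ++ [((xs.length : Int), x)] := by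
  rw [PySem.List.enumerate_append]
  simp [PySem.List.enumerate_cons, PySem.List.enumerate_nil]

theorem pvLastD_append (xs : List Char) (x : Char) :
    pvLastD (xs ++ [x]) = (pvLastD xs).insert x (xs.length : Int) := by
  unfold pvLastD
  rw [pvEnum_append, List.foldl_append]
  rfl

theorem pvFirstD_append (xs : List Char) (x : Char) :
    pvFirstD (xs ++ [x]) =
      if (pvFirstD xs).contains x then pvFirstD xs
      else (pvFirstD xs).insert x (xs.length : Int) := by
  unfold pvFirstD
  rw [pvEnum_append, List.foldl_append]
  rfl

theorem pvLastD_get? (l : List Char) (c : Char) :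
    (pvLastD l).get? c = (pvLast? c l).map Int.ofNat := by
  induction l using List.reverseRecOn with
  | nil => simp [pvLastD, PySem.List.enumerate_nil, pvLast?, PySem.Dict.get?_empty]
  | append_singleton xs x ih =>
    rw [pvLastD_append, pvLast?_append_singleton]
    by_cases hx : x = c
    · subst hx
      rw [PySem.Dict.get?_insert_self]
      simp
    · rw [PySem.Dict.get?_insert_of_ne _ _ (fun h => hx h.symm), ih]
      simp [hx]

theorem pvFirstD_get? (l : List Char) : ∀ (c : Char),
    (pvFirstD l).get? c = (pvFirst? c l).map Int.ofNat := by
  induction l using List.reverseRecOn with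
  | nil =>
    intro c
    simp [pvFirstD, PySem.List.enumerate_nil, pvFirst?, PySem.Dict.get?_empty]
  | append_singleton xs x ih =>
    intro c
    rw [pvFirstD_append, pvFirst?_append_singleton]
    by_cases hcon : (pvFirstD xs).contains x = true
    · rw [if_pos hcon]
      rw [PySem.Dict.contains_eq_isSome_get?, ih x] at hcon
      cases h : pvFirst? c xs with
      | some k => rw [ih c, h]
      | none =>
        rw [ih c, h]
        have hxc : x ≠ c := by
          intro he; subst he; rw [h] at hcon; simp at hcon
        simp [hxc]
    · rw [if_neg hcon]
      rw [PySem.Dict.contains_eq_isSome_get?, ih x] at hcon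
      have hxnone : pvFirst? x xs = none := by
        cases h : pvFirst? x xs with
        | none => rfl
        | some k => rw [h] at hcon; simp at hcon
      by_cases hcx : c = x
      · subst hcx
        rw [PySem.Dict.get?_insert_self, hxnone]
        simp
      · rw [PySem.Dict.get?_insert_of_ne _ _ hcx, ih c]
        cases h : pvFirst? c xs with
        | some k => rfl
        | none =>
          have hxc : ¬ x = c := fun he => hcx he.symm
          simp [hxc]

theorem pvOfList_append (xs : List Char) (x : Char) :
    PySem.Set.ofList (xs ++ [x]) = PySem.Set.add (PySem.Set.ofList xs) x := by
  rw [PySem.Set.ofList_eq_foldl, PySem.Set.ofList_eq_foldl, List.foldl_append]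
  rfl

theorem pvLastD_contains (xs : List Char) (x : Char) :
    (pvLastD xs).contains x = true ↔ x ∈ xs := by
  rw [PySem.Dict.contains_eq_isSome_get?, pvLastD_get?]
  cases h : pvLast? x xs with
  | some k =>
    simp only [Option.map_some, Option.isSome_some, true_iff]
    by_contra hn
    rw [(pvLast?_eq_none x xs).mpr hn] at h
    cases h
  | none =>
    simp only [Option.map_none, Option.isSome_none, Bool.false_eq_true, false_iff]
    exact (pvLast?_eq_none x xs).mp h

theorem pvFirstD_contains (xs : List Char) (x : Char) :
    (pvFirstD xs).contains x = true ↔ x ∈ xs := by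
  rw [PySem.Dict.contains_eq_isSome_get?, pvFirstD_get?]
  cases h : pvFirst? x xs with
  | some k =>
    simp only [Option.map_some, Option.isSome_some, true_iff]
    by_contra hn
    rw [(pvFirst?_eq_none x xs).mpr hn] at h
    cases h
  | none =>
    simp only [Option.map_none, Option.isSome_none, Bool.false_eq_true, false_iff]
    exact (pvFirst?_eq_none x xs).mp h

theorem pvLastD_keys (l : List Char) : (pvLastD l).keys = PySem.Set.ofList l := by
  induction l using List.reverseRecOn with
  | nil => simp [pvLastD, PySem.List.enumerate_nil, PySem.Dict.keys_empty, PySem.Set.ofList]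
  | append_singleton xs x ih =>
    rw [pvLastD_append, pvOfList_append]
    by_cases hc : (pvLastD xs).contains x = true
    · rw [PySem.Dict.keys_insert_of_contains _ _ hc, ih]
      have hx : x ∈ xs := (pvLastD_contains xs x).mp hc
      simp [PySem.Set.add]
      exact hx
    · rw [PySem.Dict.keys_insert_of_not_contains _ _ (by simpa using hc), ih]
      have hx : x ∉ xs := fun hm => hc ((pvLastD_contains xs x).mpr hm)
      simp [PySem.Set.add]
      exact hx

theorem pvFirstD_keys (l : List Char) : (pvFirstD l).keys = PySem.Set.ofList l := by
  induction l using List.reverseRecOn with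
  | nil => simp [pvFirstD, PySem.List.enumerate_nil, PySem.Dict.keys_empty, PySem.Set.ofList]
  | append_singleton xs x ih =>
    rw [pvFirstD_append, pvOfList_append]
    by_cases hc : (pvFirstD xs).contains x = true
    · rw [if_pos hc, ih]
      have hx : x ∈ xs := (pvFirstD_contains xs x).mp hc
      simp [PySem.Set.add]
      exact hx
    · rw [if_neg hc, PySem.Dict.keys_insert_of_not_contains _ _ (by simpa using hc), ih]
      have hx : x ∉ xs := fun hm => hc ((pvFirstD_contains xs x).mpr hm)
      simp [PySem.Set.add]
      exact hx

theorem pvALoop_run (l : List Char) (i0 : Nat) (hlen : i0 < l.length)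
    (hcov : pvCovers l (l.take (i0 + 1)))
    (hmin : ∀ j < i0, ¬ pvCovers l (l.take (j + 1))) :
    ∀ i, i ≤ i0 →
      pvALoop (PySem.Set.len (PySem.Set.ofList l)) (l.drop i) (PySem.Set.ofList (l.take i)) i
        = some i0 := by
  have key : ∀ d i, i ≤ i0 → i0 - i = d →
      pvALoop (PySem.Set.len (PySem.Set.ofList l)) (l.drop i) (PySem.Set.ofList (l.take i)) i
        = some i0 := by
    intro d
    induction d with
    | zero =>
      intro i hi hd
      have hii : i = i0 := by omega
      subst hii
      rw [List.drop_eq_getElem_cons hlen]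
      simp only [pvALoop]
      have hacc : PySem.Set.add (PySem.Set.ofList (l.take i)) l[i] = PySem.Set.ofList (l.take (i + 1)) := by
        rw [← pvOfList_append, ← List.take_concat_get' l i hlen]
      rw [hacc, if_pos ((pvCover_len l (l.take (i + 1)) (List.take_subset _ _)).mpr hcov)]
    | succ d ih =>
      intro i hi hd
      have hlt : i < i0 := by omega
      have hil : i < l.length := by omega
      rw [List.drop_eq_getElem_cons hil]
      simp only [pvALoop]
      have hacc : PySem.Set.add (PySem.Set.ofList (l.take i)) l[i] = PySem.Set.ofList (l.take (i + 1)) := by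
        rw [← pvOfList_append, ← List.take_concat_get' l i hil]
      rw [hacc, if_neg, ih (i + 1) (by omega) (by omega)]
      intro hceq
      exact hmin i hlt ((pvCover_len l (l.take (i + 1)) (List.take_subset _ _)).mp hceq)
  intro i hi
  exact key (i0 - i) i hi rfl

theorem pvFirstD_mem_values (l : List Char) (v : Int) :
    v ∈ (pvFirstD l).values ↔ ∃ c ∈ l, (pvFirstD l).get? c = some v := by
  rw [PySem.Dict.values_eq_map_keys _ (by rw [pvFirstD_keys]; exact PySem.Set.nodup_ofList l) 0]
  simp only [List.mem_map, pvFirstD_keys]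
  constructor
  · rintro ⟨c, hc, hv⟩
    have hcl : c ∈ l := (PySem.Set.mem_ofList l c).mp hc
    refine ⟨c, hcl, ?_⟩
    rw [PySem.Dict.getD_eq_get?_getD] at hv
    cases h : (pvFirstD l).get? c with
    | none =>
      rw [pvFirstD_get?] at h
      cases hq : pvFirst? c l with
      | none => exact absurd hcl ((pvFirst?_eq_none c l).mp hq)
      | some k => rw [hq] at h; cases h
    | some w => rw [h] at hv; simp at hv; rw [hv]
  · rintro ⟨c, hcl, hv⟩
    refine ⟨c, (PySem.Set.mem_ofList l c).mpr hcl, ?_⟩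
    rw [PySem.Dict.getD_eq_get?_getD, hv]
    rfl

theorem pvLastD_mem_values (l : List Char) (v : Int) :
    v ∈ (pvLastD l).values ↔ ∃ c ∈ l, (pvLastD l).get? c = some v := by
  rw [PySem.Dict.values_eq_map_keys _ (by rw [pvLastD_keys]; exact PySem.Set.nodup_ofList l) 0]
  simp only [List.mem_map, pvLastD_keys]
  constructor
  · rintro ⟨c, hc, hv⟩
    have hcl : c ∈ l := (PySem.Set.mem_ofList l c).mp hc
    refine ⟨c, hcl, ?_⟩
    rw [PySem.Dict.getD_eq_get?_getD] at hv
    cases h : (pvLastD l).get? c with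
    | none =>
      rw [pvLastD_get?] at h
      cases hq : pvLast? c l with
      | none => exact absurd hcl ((pvLast?_eq_none c l).mp hq)
      | some k => rw [hq] at h; cases h
    | some w => rw [h] at hv; simp at hv; rw [hv]
  · rintro ⟨c, hcl, hv⟩
    refine ⟨c, (PySem.Set.mem_ofList l c).mpr hcl, ?_⟩
    rw [PySem.Dict.getD_eq_get?_getD, hv]
    rfl

theorem check_symmetrical_str_eq (s : String) :
    check_symmetrical_str s = check_symmetrical_str_alt s := by
  by_cases hnil : s.toList = []
  · simp [check_symmetrical_str, check_symmetrical_str_alt, hnil]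
  · simp only [check_symmetrical_str, check_symmetrical_str_alt, if_neg hnil]
    set l := s.toList with hl
    -- B's loop over (first, last) is the pair of the two independent dict folds
    rw [PySem.List.foldl_prod_mk
      (f := fun (d : PySem.Dict Char Int) (p : Int × Char) => if d.contains p.2 then d else d.insert p.2 p.1)
      (g := fun (d : PySem.Dict Char Int) (p : Int × Char) => d.insert p.2 p.1)]
    have hF : (PySem.List.enumerate l 0).foldl
        (fun (d : PySem.Dict Char Int) (p : Int × Char) => if d.contains p.2 then d else d.insert p.2 p.1)
        PySem.Dict.empty = pvFirstD l := rfl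
    have hG : (PySem.List.enumerate l 0).foldl
        (fun (d : PySem.Dict Char Int) (p : Int × Char) => d.insert p.2 p.1)
        PySem.Dict.empty = pvLastD l := rfl
    rw [hF, hG]
    -- the distinct-character set is nonempty
    obtain ⟨c₁, hc₁⟩ := List.exists_mem_of_ne_nil l hnil
    have hDne : (PySem.Set.ofList l : List Char) ≠ [] := by
      intro h
      have := (PySem.Set.mem_ofList l c₁).mpr hc₁
      rw [h] at this
      cases this
    have hkFnd : (pvFirstD l).keys.Nodup := by rw [pvFirstD_keys]; exact PySem.Set.nodup_ofList l
    have hkLnd : (pvLastD l).keys.Nodup := by rw [pvLastD_keys]; exact PySem.Set.nodup_ofList l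
    have hvFne : (pvFirstD l).values ≠ [] := by
      rw [PySem.Dict.values_eq_map_keys _ hkFnd 0, pvFirstD_keys]
      simpa using hDne
    have hvLne : (pvLastD l).values ≠ [] := by
      rw [PySem.Dict.values_eq_map_keys _ hkLnd 0, pvLastD_keys]
      simpa using hDne
    cases hfm : PySem.List.max? (pvFirstD l).values (fun v => v) with
    | none => exact absurd ((PySem.List.max?_eq_none_iff _ _).mp hfm) hvFne
    | some fm =>
    cases hlm : PySem.List.min? (pvLastD l).values (fun v => v) with
    | none => exact absurd ((PySem.List.min?_eq_none_iff _ _).mp hlm) hvLne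
    | some lm =>
    -- fm is the (cast) first-occurrence index of some character c₀
    obtain ⟨c₀, hc₀l, hc₀g⟩ := (pvFirstD_mem_values l fm).mp (PySem.List.max?_mem hfm)
    rw [pvFirstD_get? l c₀] at hc₀g
    obtain ⟨fmN, hfmN, hfmcast⟩ : ∃ k, pvFirst? c₀ l = some k ∧ fm = Int.ofNat k := by
      cases hq : pvFirst? c₀ l with
      | none => rw [hq] at hc₀g; cases hc₀g
      | some k => rw [hq] at hc₀g; exact ⟨k, rfl, by simpa using hc₀g.symm⟩
    obtain ⟨hfmlen, _, _⟩ := pvFirst?_spec c₀ l fmN hfmN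
    -- every first-occurrence index is ≤ fmN
    have hFle : ∀ c ∈ l, ∀ k, pvFirst? c l = some k → k ≤ fmN := by
      intro c hc k hk
      have hmem : (Int.ofNat k) ∈ (pvFirstD l).values := by
        exact (pvFirstD_mem_values l _).mpr ⟨c, hc, by rw [pvFirstD_get? l c, hk]; rfl⟩
      have := PySem.List.max?_isMax hfm _ hmem
      rw [hfmcast] at this
      simp only [Int.ofNat_eq_natCast] at this
      omega
    -- A's loop breaks exactly at index fmN
    have hloop : pvALoop (PySem.Set.len (PySem.Set.ofList l)) l PySem.Set.empty 0 = some fmN := by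
      have hcov : pvCovers l (l.take (fmN + 1)) := by
        intro c hc
        cases hq : pvFirst? c l with
        | none => exact absurd hc ((pvFirst?_eq_none c l).mp hq)
        | some k =>
          exact (mem_take_iff_pvFirst c l (fmN + 1)).mpr ⟨k, hq, by
            have := hFle c hc k hq; omega⟩
      have hmin : ∀ j < fmN, ¬ pvCovers l (l.take (j + 1)) := by
        intro j hj hcovj
        obtain ⟨k, hk, hklt⟩ := (mem_take_iff_pvFirst c₀ l (j + 1)).mp (hcovj c₀ hc₀l)
        rw [hfmN] at hk
        have : fmN = k := by injection hk
        omega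
      have h0 := pvALoop_run l fmN hfmlen hcov hmin 0 (Nat.zero_le _)
      rw [List.drop_zero, List.take_zero] at h0
      exact h0
    rw [hloop]
    show (if PySem.Set.len (PySem.Set.ofList (PySem.List.slice l (some ((fmN : Int) + 1)) none)) = PySem.Set.len (PySem.Set.ofList l) then "YES" else "NO")
      = (if lm > fm then "YES" else "NO")
    -- A's suffix slice is drop (fmN + 1)
    have hslice : PySem.List.slice l (some ((fmN : Int) + 1)) none = l.drop (fmN + 1) := by
      have ht : ((fmN : Int) + 1).toNat = fmN + 1 := by omega
      rw [PySem.List.slice_from l (by omega), ht]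
    rw [hslice]
    -- A's final test ↔ lm > fm
    have hAiff : PySem.Set.len (PySem.Set.ofList (l.drop (fmN + 1))) = PySem.Set.len (PySem.Set.ofList l)
        ↔ lm > fm := by
      rw [pvCover_len l _ (List.drop_subset _ _)]
      constructor
      · intro hcov
        obtain ⟨c₂, hc₂l, hc₂g⟩ := (pvLastD_mem_values l lm).mp (PySem.List.min?_mem hlm)
        rw [pvLastD_get? l c₂] at hc₂g
        obtain ⟨lmN, hlmN, hlmcast⟩ : ∃ k, pvLast? c₂ l = some k ∧ lm = Int.ofNat k := by
          cases hq : pvLast? c₂ l with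
          | none => rw [hq] at hc₂g; cases hc₂g
          | some k => rw [hq] at hc₂g; exact ⟨k, rfl, by simpa using hc₂g.symm⟩
        obtain ⟨k, hk, hge⟩ := (mem_drop_iff_pvLast c₂ l (fmN + 1)).mp (hcov c₂ hc₂l)
        rw [hlmN] at hk
        cases hk
        rw [hfmcast, hlmcast]
        simp only [Int.ofNat_eq_natCast]
        omega
      · intro hgt c hc
        cases hq : pvLast? c l with
        | none => exact absurd hc ((pvLast?_eq_none c l).mp hq)
        | some k =>
          have hmem : (Int.ofNat k) ∈ (pvLastD l).values :=
            (pvLastD_mem_values l _).mpr ⟨c, hc, by rw [pvLastD_get? l c, hq]; rfl⟩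
          have hle := PySem.List.min?_isMin hlm _ hmem
          have : fmN < k := by
            rw [hfmcast] at hgt
            simp only [Int.ofNat_eq_natCast] at hgt hle
            omega
          exact (mem_drop_iff_pvLast c l (fmN + 1)).mpr ⟨k, hq, by omega⟩
    by_cases hcond : PySem.Set.len (PySem.Set.ofList (l.drop (fmN + 1))) = PySem.Set.len (PySem.Set.ofList l)
    · rw [if_pos hcond, if_pos (hAiff.mp hcond)]
    · rw [if_neg hcond, if_neg (fun h => hcond (hAiff.mpr h))]

-- ===== VERDICT (by name: the statement is the Claim_ definition above) =====
theorem check_symmetrical_str_spec : Claim_equal_check_symmetrical_str := by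
  intro s _
  unfold Spec_check_symmetrical_str
  exact check_symmetrical_str_eq s
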